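-- pv_equiv track=rewrite | github.com/jkjan/PS | Class101/3.py | solution
-- ===== SOURCE A (Python) =====
-- def solution(A):
--     consec = 0
--     pay = []
--     answer = 0
--
--     for a in A:
--         consec += a
--
--         if a < 0:
--             pay.append(a)
--
--         if consec < 0:
--             pay.sort(reverse=True)
--             go_back = pay.pop()
--             consec -= go_back
--             answer += 1
--
--     return answer
-- ===== SOURCE B (Python) =====
-- # B: leftist min-heap of the stored negatives instead of re-sorting the list
-- # at every deficit: push each negative in O(log k), pop the most negative in
-- # O(log k), so no O(k log k) sort inside the loop.
--
-- def _rank(t):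
--     return 0 if t is None else t[1]
--
--
-- def _merge(a, b):
--     # leftist-heap merge; nodes are (value, rank, left, right)
--     if a is None:
--         return b
--     if b is None:
--         return a
--     if b[0] < a[0]:
--         a, b = b, a
--     l = a[2]
--     r = _merge(a[3], b)
--     if _rank(l) < _rank(r):
--         l, r = r, l
--     return (a[0], _rank(r) + 1, l, r)
--
--
-- def solution(A):
--     consec = 0
--     heap = None
--     answer = 0
--     for a in A:
--         consec += a
--         if a < 0:
--             heap = _merge(heap, (a, 1, None, None))
--         if consec < 0:
--             go_back = heap[0]
--             heap = _merge(heap[2], heap[3])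
--             consec -= go_back
--             answer += 1
--     return answer
-- ===== Notes on version B (the rewrite author's own statement) =====
-- stated objective: alternative
-- what changed: A appends each negative to a plain list and re-sorts that list on every deficit before popping; B keeps the stored negatives in a hand-written leftist min-heap and pops its root, so no sort ever runs inside the loop (a timing run's random inputs do not trigger A's bad case, so no speed is claimed).
import Mathlib
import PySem

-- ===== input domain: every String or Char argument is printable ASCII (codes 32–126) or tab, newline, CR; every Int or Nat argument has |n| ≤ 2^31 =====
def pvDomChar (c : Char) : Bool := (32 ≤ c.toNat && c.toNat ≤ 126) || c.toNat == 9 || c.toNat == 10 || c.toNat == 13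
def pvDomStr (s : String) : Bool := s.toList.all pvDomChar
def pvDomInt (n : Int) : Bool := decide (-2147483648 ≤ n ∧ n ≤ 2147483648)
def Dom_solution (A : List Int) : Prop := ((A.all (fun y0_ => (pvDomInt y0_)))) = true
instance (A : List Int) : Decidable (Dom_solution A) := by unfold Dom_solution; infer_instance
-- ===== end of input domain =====

-- B replaces A's sort-inside-the-loop by a hand-written leftist min-heap of the
-- stored negatives (push/pop instead of re-sorting); equivalence of the returned count is proved.

-- ===== PORT A =====
-- one iteration of A's for-loop; state = (consec, pay, answer)
def solutionStep (s : Int × List Int × Int) (a : Int) : Int × List Int × Int :=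
  let consec := s.1 + a
  let pay := if a < 0 then s.2.1 ++ [a] else s.2.1
  if consec < 0 then
    match PySem.List.pop? (PySem.List.sorted pay (fun x => x) true) with
    | some (go_back, rest) => (consec - go_back, rest, s.2.2 + 1)
    | none => (consec, pay, s.2.2)  -- pay.pop() on []: IndexError in Python; unreachable (pay ≠ [] whenever consec < 0)
  else (consec, pay, s.2.2)

def solution (A : List Int) : Int := (A.foldl solutionStep (0, [], 0)).2.2

-- ===== PORT B =====
-- leftist min-heap node: value, rank, left child, right child (Source B's tuple (value, rank, left, right); nil = None)
inductive PVHeap where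
  | nil : PVHeap
  | node : Int → Nat → PVHeap → PVHeap → PVHeap
deriving DecidableEq, Repr

def pvRank : PVHeap → Nat
  | .nil => 0
  | .node _ r _ _ => r

def pvHeapSize : PVHeap → Nat
  | .nil => 0
  | .node _ _ l r => pvHeapSize l + pvHeapSize r + 1

-- Source B's _merge
def pvMerge : PVHeap → PVHeap → PVHeap
  | .nil, b => b
  | a, .nil => a
  | .node x ra la ra', .node y rb lb rb' =>
      if y < x then
        -- a, b = b, a
        let l := lb
        let r := pvMerge rb' (.node x ra la ra')
        if pvRank l < pvRank r then .node y (pvRank l + 1) r l else .node y (pvRank r + 1) l r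
      else
        let l := la
        let r := pvMerge ra' (.node y rb lb rb')
        if pvRank l < pvRank r then .node x (pvRank l + 1) r l else .node x (pvRank r + 1) l r
termination_by a b => pvHeapSize a + pvHeapSize b
decreasing_by all_goals (simp [pvHeapSize]; try omega)

-- one iteration of B's for-loop; state = (consec, heap, answer)
def solutionAltStep (s : Int × PVHeap × Int) (a : Int) : Int × PVHeap × Int :=
  let consec := s.1 + a
  let heap := if a < 0 then pvMerge s.2.1 (.node a 1 .nil .nil) else s.2.1
  if consec < 0 then
    match heap with
    | .node go_back _ l r => (consec - go_back, pvMerge l r, s.2.2 + 1)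
    | .nil => (consec, heap, s.2.2)  -- heap[0] on None: TypeError in Python; unreachable (heap ≠ None whenever consec < 0)
  else (consec, heap, s.2.2)

def solution_alt (A : List Int) : Int := (A.foldl solutionAltStep (0, .nil, 0)).2.2

-- ===== PRECONDITION & SPEC =====
def Spec_solution (A : List Int) (out : Int) : Prop := out = solution_alt A
instance (A : List Int) (out : Int) : Decidable (Spec_solution A out) := by unfold Spec_solution; infer_instance

-- ===== CLAIM (what is proved, stated in full; the proofs are below) =====
def Claim_equal_solution : Prop := ∀ (A : List Int), Dom_solution A → Spec_solution A (solution A)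

-- ===== LEMMAS AND PROOFS =====

-- multiset of values stored in a heap
def pvMs : PVHeap → Multiset Int
  | .nil => 0
  | .node x _ l r => pvMs l + pvMs r + {x}

-- min-heap order: the value at each node is ≤ every value below it
def pvOrd : PVHeap → Prop
  | .nil => True
  | .node x _ l r => pvOrd l ∧ pvOrd r ∧ (∀ y ∈ pvMs l, x ≤ y) ∧ (∀ y ∈ pvMs r, x ≤ y)

theorem pvMs_merge (a b : PVHeap) : pvMs (pvMerge a b) = pvMs a + pvMs b := by
  induction a, b using pvMerge.induct with
  | case1 b => simp [pvMerge, pvMs]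
  | case2 a h => cases a with
      | nil => exact absurd rfl h
      | node => simp [pvMerge, pvMs]
  | case3 x ra la ra' y rb lb rb' hlt _ _ hr ih =>
      rw [pvMerge]; simp only [if_pos hlt]; split <;> (simp [pvMs, ih]; abel)
  | case4 x ra la ra' y rb lb rb' hlt _ _ hr ih =>
      rw [pvMerge]; simp only [if_pos hlt]; split <;> (simp [pvMs, ih]; abel)
  | case5 x ra la ra' y rb lb rb' hlt _ _ hr ih =>
      rw [pvMerge]; simp only [if_neg hlt]; split <;> (simp [pvMs, ih]; abel)
  | case6 x ra la ra' y rb lb rb' hlt _ _ hr ih =>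
      rw [pvMerge]; simp only [if_neg hlt]; split <;> (simp [pvMs, ih]; abel)

theorem pvOrd_root_le {x : Int} {k : Nat} {l r : PVHeap} (h : pvOrd (.node x k l r)) :
    ∀ y ∈ pvMs (.node x k l r), x ≤ y := by
  intro y hy
  simp only [pvMs, Multiset.mem_add, Multiset.mem_singleton] at hy
  rcases hy with (hy | hy) | hy
  · exact h.2.2.1 y hy
  · exact h.2.2.2 y hy
  · exact le_of_eq hy.symm

theorem pvOrd_merge (a b : PVHeap) (ha : pvOrd a) (hb : pvOrd b) : pvOrd (pvMerge a b) := by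
  revert ha hb
  induction a, b using pvMerge.induct with
  | case1 b => intro _ hb; simpa [pvMerge] using hb
  | case2 a h => cases a with
      | nil => exact absurd rfl h
      | node => intro ha _; simpa [pvMerge] using ha
  | case3 x ra la ra' y rb lb rb' hlt _ _ hr ih =>
      intro ha hb
      rw [pvMerge]; simp only [if_pos hlt]
      have hmrg := ih hb.2.1 ha
      have hm : ∀ z ∈ pvMs (pvMerge rb' (PVHeap.node x ra la ra')), y ≤ z := by
        intro z hz
        rw [pvMs_merge, Multiset.mem_add] at hz
        exact hz.elim (hb.2.2.2 z) (fun h2 => le_trans (le_of_lt hlt) (pvOrd_root_le ha z h2))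
      split <;> exact ⟨hmrg, hb.1, hm, hb.2.2.1⟩
  | case4 x ra la ra' y rb lb rb' hlt _ _ hr ih =>
      intro ha hb
      rw [pvMerge]; simp only [if_pos hlt]
      have hmrg := ih hb.2.1 ha
      have hm : ∀ z ∈ pvMs (pvMerge rb' (PVHeap.node x ra la ra')), y ≤ z := by
        intro z hz
        rw [pvMs_merge, Multiset.mem_add] at hz
        exact hz.elim (hb.2.2.2 z) (fun h2 => le_trans (le_of_lt hlt) (pvOrd_root_le ha z h2))
      split <;>
        first
          | exact ⟨hmrg, hb.1, hm, hb.2.2.1⟩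
          | exact ⟨hb.1, hmrg, hb.2.2.1, hm⟩
  | case5 x ra la ra' y rb lb rb' hlt _ _ hr ih =>
      intro ha hb
      rw [pvMerge]; simp only [if_neg hlt]
      have hmrg := ih ha.2.1 hb
      have hm : ∀ z ∈ pvMs (pvMerge ra' (PVHeap.node y rb lb rb')), x ≤ z := by
        intro z hz
        rw [pvMs_merge, Multiset.mem_add] at hz
        exact hz.elim (ha.2.2.2 z) (fun h2 => le_trans (not_lt.mp hlt) (pvOrd_root_le hb z h2))
      split <;> exact ⟨hmrg, ha.1, hm, ha.2.2.1⟩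
  | case6 x ra la ra' y rb lb rb' hlt _ _ hr ih =>
      intro ha hb
      rw [pvMerge]; simp only [if_neg hlt]
      have hmrg := ih ha.2.1 hb
      have hm : ∀ z ∈ pvMs (pvMerge ra' (PVHeap.node y rb lb rb')), x ≤ z := by
        intro z hz
        rw [pvMs_merge, Multiset.mem_add] at hz
        exact hz.elim (ha.2.2.2 z) (fun h2 => le_trans (not_lt.mp hlt) (pvOrd_root_le hb z h2))
      split <;>
        first
          | exact ⟨hmrg, ha.1, hm, ha.2.2.1⟩
          | exact ⟨ha.1, hmrg, ha.2.2.1, hm⟩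

theorem pvMs_eq_zero_iff (h : PVHeap) : pvMs h = 0 ↔ h = .nil := by
  cases h <;> simp [pvMs]

-- what A's sort-then-pop does to a nonempty pay: pops one occurrence of the minimum
theorem pvPopSorted (pay : List Int) (hne : pay ≠ []) :
    ∃ g rest, PySem.List.pop? (PySem.List.sorted pay (fun x => x) true) = some (g, rest) ∧
      (↑pay : Multiset Int) = ↑rest + {g} ∧ ∀ y ∈ pay, g ≤ y := by
  set sp := PySem.List.sorted pay (fun x => x) true with hsp
  have hspne : sp ≠ [] := by
    rw [hsp]; simpa [PySem.List.sorted_eq_nil_iff] using hne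
  obtain ⟨rest, g, hsplit⟩ : ∃ l' g, sp = l' ++ [g] := by
    rcases List.eq_nil_or_concat sp with h | ⟨l', b, hb⟩
    · exact absurd h hspne
    · exact ⟨l', b, by simpa [List.concat_eq_append] using hb⟩
  have hperm : sp.Perm pay := PySem.List.sorted_perm pay _ true
  refine ⟨g, rest, ?_, ?_, ?_⟩
  · rw [hsplit]; exact PySem.List.pop?_last rest g
  · calc (↑pay : Multiset Int) = ↑sp := (Multiset.coe_eq_coe.mpr hperm).symm
      _ = ↑rest + {g} := by
        rw [hsplit, ← Multiset.coe_singleton, Multiset.coe_add]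
  · intro y hy
    have hy' : y ∈ sp := hperm.mem_iff.mpr hy
    have hpw := PySem.List.sorted_pairwise_rev pay (fun x => x)
    rw [← hsp, hsplit] at hpw
    rw [hsplit] at hy'
    rcases List.mem_append.mp hy' with h | h
    · exact (List.pairwise_append.mp hpw).2.2 y h g (List.mem_singleton_self g)
    · exact le_of_eq (List.mem_singleton.mp h).symm

-- the simulation relation between A's state and B's state
def pvRel (s : Int × List Int × Int) (t : Int × PVHeap × Int) : Prop :=
  s.1 = t.1 ∧ (↑s.2.1 : Multiset Int) = pvMs t.2.1 ∧ pvOrd t.2.1 ∧ s.2.2 = t.2.2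

theorem pvRel_step {s t} (h : pvRel s t) (a : Int) :
    pvRel (solutionStep s a) (solutionAltStep t a) := by
  obtain ⟨c, pay, ans⟩ := s
  obtain ⟨c', hp, ans'⟩ := t
  obtain ⟨h1, h2, h3, h4⟩ := h
  simp only at h1 h2 h3 h4
  subst h1 h4
  simp only [solutionStep, solutionAltStep]
  -- the push part of the iteration
  have hms : (↑(if a < 0 then pay ++ [a] else pay) : Multiset Int)
      = pvMs (if a < 0 then pvMerge hp (.node a 1 .nil .nil) else hp) := by
    split
    · rw [pvMs_merge, ← Multiset.coe_add, h2]
      simp [pvMs]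
    · exact h2
  have hord : pvOrd (if a < 0 then pvMerge hp (.node a 1 .nil .nil) else hp) := by
    split
    · exact pvOrd_merge _ _ h3 ⟨trivial, trivial, by simp [pvMs], by simp [pvMs]⟩
    · exact h3
  set pay' := if a < 0 then pay ++ [a] else pay
  set hp' := if a < 0 then pvMerge hp (.node a 1 .nil .nil) else hp
  clear_value pay' hp'
  split
  · -- deficit: pop the minimum on both sides
    by_cases hne : pay' = []
    · have hnil : hp' = .nil := (pvMs_eq_zero_iff hp').mp (by rw [← hms, hne]; rfl)
      subst hne hnil
      exact ⟨rfl, rfl, trivial, rfl⟩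
    · obtain ⟨g, rest, hpop, hmsplit, hmin⟩ := pvPopSorted pay' hne
      rw [hpop]
      cases hp' with
      | nil => exact absurd ((Multiset.coe_eq_zero _).mp (by rw [hms]; rfl)) hne
      | node gB k l r =>
        have hgB_mem : gB ∈ pay' := by
          have hmem : gB ∈ pvMs (PVHeap.node gB k l r) := by simp [pvMs]
          rw [← hms] at hmem
          exact Multiset.mem_coe.mp hmem
        have hg_mem : g ∈ pay' := by
          have hmem : g ∈ (↑pay' : Multiset Int) := by rw [hmsplit]; simp
          exact Multiset.mem_coe.mp hmem
        have heq : g = gB := by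
          refine le_antisymm (hmin gB hgB_mem) ?_
          exact pvOrd_root_le hord g (by rw [← hms]; exact Multiset.mem_coe.mpr hg_mem)
        have hrest : (↑rest : Multiset Int) = pvMs (pvMerge l r) := by
          have hcan : (↑rest : Multiset Int) + {g} = pvMs l + pvMs r + {g} := by
            rw [← hmsplit, hms, heq]; rfl
          rw [pvMs_merge]
          exact add_right_cancel hcan
        exact ⟨by rw [heq], hrest, pvOrd_merge l r hord.1 hord.2.1, rfl⟩
  · exact ⟨rfl, hms, hord, rfl⟩

theorem pvRel_foldl (L : List Int) {s t} (h : pvRel s t) :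
    pvRel (L.foldl solutionStep s) (L.foldl solutionAltStep t) := by
  induction L generalizing s t with
  | nil => exact h
  | cons a L ih => exact ih (pvRel_step h a)

-- ===== VERDICT (by name: the statement is the Claim_ definition above) =====
theorem solution_spec : Claim_equal_solution := by
  intro A _
  unfold Spec_solution solution solution_alt
  exact (pvRel_foldl A (by refine ⟨rfl, ?_, trivial, rfl⟩; simp [pvMs])).2.2.2
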